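-- pv_equiv track=rewrite | github.com/datafatmunger/jbg-notebooks | scratch/20250404_Maximal_Munch.py | maximal_munch
-- ===== SOURCE A (Python) =====
-- def maximal_munch(pauli_str):
--     chunks = []
--     start = None
--
--     for i, c in enumerate(pauli_str):
--         if c in {'X', 'Y', 'Z'}:
--             if start is None:
--                 start = i
--         else:
--             if start is not None:
--                 chunks.append((start, pauli_str[start:i]))
--                 start = None
--
--     if start is not None:
--         chunks.append((start, pauli_str[start:]))
--
--     return chunks
-- ===== SOURCE B (Python) =====
-- def maximal_munch(pauli_str):
--     chunks = []
--     n = len(pauli_str)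
--     i = 0
--     while i < n:
--         if pauli_str[i] in 'XYZ':
--             j = i + 1
--             while j < n and pauli_str[j] in 'XYZ':
--                 j += 1
--             chunks.append((i, pauli_str[i:j]))
--             i = j
--         else:
--             i += 1
--     return chunks
-- ===== Notes on version B (the rewrite author's own statement) =====
-- stated objective: alternative
-- what changed: Replaces A's per-character state machine (Optional start sentinel flushed on non-Pauli chars and at end-of-string) with a two-pointer scanner that, on hitting a Pauli char, advances an inner pointer j to the run's end and emits the slice at once, jumping i to j.
import Mathlib
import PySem

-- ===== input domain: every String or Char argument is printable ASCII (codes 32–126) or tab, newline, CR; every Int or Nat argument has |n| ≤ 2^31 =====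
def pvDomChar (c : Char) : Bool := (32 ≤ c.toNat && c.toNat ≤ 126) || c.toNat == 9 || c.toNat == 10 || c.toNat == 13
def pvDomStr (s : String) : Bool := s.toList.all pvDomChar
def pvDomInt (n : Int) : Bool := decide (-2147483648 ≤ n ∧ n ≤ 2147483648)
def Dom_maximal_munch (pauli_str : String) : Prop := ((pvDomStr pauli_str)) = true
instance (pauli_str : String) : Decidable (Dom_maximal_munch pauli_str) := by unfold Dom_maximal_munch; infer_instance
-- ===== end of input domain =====

-- B replaces A's start-sentinel state machine with a two-pointer scanner that finds each
-- run's end directly and emits its slice at once (alternative decomposition, same cost).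

-- ===== PORT A =====
-- c in {'X','Y','Z'}
def pvIsP (c : Char) : Bool := c = 'X' || c = 'Y' || c = 'Z'

-- the for-loop over enumerate(pauli_str) as structural recursion over the same state
-- (chunks, start); slices of the original string via PySem.List.slice (exact Python slicing)
def munchGoA (full : List Char) (i : Nat) (cs : List Char)
    (chunks : List (Int × String)) (start : Option Nat) : List (Int × String) :=
  match cs with
  | [] =>
    match start with
    | some s => chunks ++ [((s : Int), String.ofList (PySem.List.slice full (some (s : Int)) none))]
    | none => chunks
  | c :: rest =>
    if pvIsP c then
      match start with
      | none => munchGoA full (i + 1) rest chunks (some i)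
      | some _ => munchGoA full (i + 1) rest chunks start
    else
      match start with
      | some s =>
          munchGoA full (i + 1) rest
            (chunks ++ [((s : Int), String.ofList (PySem.List.slice full (some (s : Int)) (some (i : Int))))]) none
      | none => munchGoA full (i + 1) rest chunks none

def maximal_munch (pauli_str : String) : List (Int × String) :=
  munchGoA pauli_str.toList 0 pauli_str.toList [] none

-- ===== PORT B =====
-- inner while loop: advance j while j < n and pauli_str[j] in 'XYZ'
def munchJ (full : List Char) (j : Nat) : Nat :=
  if h : j < full.length then
    if pvIsP (full[j]'h) then munchJ full (j + 1) else j
  else j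
termination_by full.length - j

-- the port of B's outer while loop cites this to justify the jump i := j
theorem le_munchJ (full : List Char) (j : Nat) : j ≤ munchJ full j := by
  fun_induction munchJ full j with
  | case1 j h hp ih => omega
  | case2 => omega
  | case3 => omega

-- outer while loop of B
def munchGoB (full : List Char) (i : Nat) : List (Int × String) :=
  if h : i < full.length then
    if pvIsP (full[i]'h) then
      let j := munchJ full (i + 1)
      ((i : Int), String.ofList (PySem.List.slice full (some (i : Int)) (some (j : Int)))) :: munchGoB full j
    else munchGoB full (i + 1)
  else []
termination_by full.length - i
decreasing_by
  · have := le_munchJ full (i + 1); omega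
  · omega

def maximal_munch_alt (pauli_str : String) : List (Int × String) :=
  munchGoB pauli_str.toList 0

-- ===== PRECONDITION & SPEC =====
def Spec_maximal_munch (pauli_str : String) (out : List (Int × String)) : Prop := out = maximal_munch_alt pauli_str
instance (pauli_str : String) (out : List (Int × String)) : Decidable (Spec_maximal_munch pauli_str out) := by unfold Spec_maximal_munch; infer_instance

-- ===== CLAIM (what is proved, stated in full; the proofs are below) =====
def Claim_equal_maximal_munch : Prop := ∀ (pauli_str : String), Dom_maximal_munch pauli_str → Spec_maximal_munch pauli_str (maximal_munch pauli_str)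

-- ===== LEMMAS AND PROOFS =====

-- common characterization: the list of maximal pvIsP-runs of cs, positions offset by i
def pvRuns (cs : List Char) (i : Nat) : List (Int × String) :=
  match cs with
  | [] => []
  | c :: rest =>
    if pvIsP c then
      ((i : Int), String.ofList (c :: rest.takeWhile pvIsP)) ::
        pvRuns (rest.dropWhile pvIsP) (i + 1 + (rest.takeWhile pvIsP).length)
    else pvRuns rest (i + 1)
termination_by cs.length
decreasing_by
  · have := List.length_dropWhile_le (p := pvIsP) (l := rest); simp; omega
  · simp

theorem pvTakeTW (p : Char → Bool) (l : List Char) :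
    l.take ((l.takeWhile p).length) = l.takeWhile p := by
  induction l with
  | nil => rfl
  | cons c l ih =>
    by_cases hp : p c
    · rw [List.takeWhile_cons_of_pos hp, List.length_cons, List.take_succ_cons, ih]
    · rw [List.takeWhile_cons_of_neg hp, List.length_nil, List.take_zero]

theorem pvDropTW (p : Char → Bool) (l : List Char) :
    l.drop ((l.takeWhile p).length) = l.dropWhile p := by
  induction l with
  | nil => rfl
  | cons c l ih =>
    by_cases hp : p c
    · rw [List.takeWhile_cons_of_pos hp, List.dropWhile_cons_of_pos hp,
        List.length_cons, List.drop_succ_cons, ih]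
    · rw [List.takeWhile_cons_of_neg hp, List.dropWhile_cons_of_neg hp,
        List.length_nil, List.drop_zero]

theorem munchGoA_spec (full : List Char) (cs : List Char) :
    (∀ i chunks, full.drop i = cs →
      munchGoA full i cs chunks none = chunks ++ pvRuns cs i) ∧
    (∀ i s pre chunks, full.drop s = pre ++ cs → s + pre.length = i →
      munchGoA full i cs chunks (some s) =
        chunks ++ ((s : Int), String.ofList (pre ++ cs.takeWhile pvIsP)) ::
          pvRuns (cs.dropWhile pvIsP) (i + (cs.takeWhile pvIsP).length)) := by
  induction cs with
  | nil =>
    constructor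
    · intro i chunks _; simp [munchGoA, pvRuns]
    · intro i s pre chunks hdrop hlen
      simp [munchGoA, pvRuns, PySem.List.slice_from_natCast, hdrop]
  | cons c rest ih =>
    constructor
    · intro i chunks hdrop
      by_cases hp : pvIsP c
      · have h2 := ih.2 (i + 1) i [c] chunks (by simpa using hdrop) (by simp)
        simp only [munchGoA, hp, if_pos]
        rw [h2]
        simp only [pvRuns, hp, if_pos, List.singleton_append]
      · have hd1 : full.drop (i + 1) = rest := by
          have h1 : (full.drop i).drop 1 = rest := by rw [hdrop]; simp
          rw [List.drop_drop] at h1; exact h1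
        have h1 := ih.1 (i + 1) chunks hd1
        simp only [munchGoA, hp]
        rw [if_neg (by simp), h1]
        simp only [pvRuns, hp]
        rw [if_neg (by simp)]
    · intro i s pre chunks hdrop hlen
      by_cases hp : pvIsP c
      · have h2 := ih.2 (i + 1) s (pre ++ [c]) chunks
          (by rw [hdrop, List.append_assoc, List.singleton_append])
          (by simp; omega)
        simp only [munchGoA, hp, if_pos]
        rw [h2, List.takeWhile_cons_of_pos hp, List.dropWhile_cons_of_pos hp,
          List.length_cons, ← List.append_cons,
          show i + ((rest.takeWhile pvIsP).length + 1) = i + 1 + (rest.takeWhile pvIsP).length by omega]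
      · have hdi : full.drop i = c :: rest := by
          rw [show i = s + pre.length by omega, ← List.drop_drop, hdrop, List.drop_left]
        have hd1 : full.drop (i + 1) = rest := by
          have h1 : (full.drop i).drop 1 = rest := by rw [hdi]; simp
          rw [List.drop_drop] at h1; exact h1
        have hslice : PySem.List.slice full (some (s : Int)) (some (i : Int)) = pre := by
          rw [PySem.List.slice_natCast, hdrop, show i - s = pre.length by omega, List.take_left]
        have h1 := ih.1 (i + 1)
          (chunks ++ [((s : Int), String.ofList (PySem.List.slice full (some (s : Int)) (some (i : Int))))]) hd1
        simp only [munchGoA, hp]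
        rw [if_neg (by simp), h1, hslice,
          List.takeWhile_cons_of_neg hp, List.dropWhile_cons_of_neg hp,
          List.length_nil, Nat.add_zero, List.append_nil, List.append_assoc, List.singleton_append]
        simp only [pvRuns, hp]
        rw [if_neg (by simp)]

theorem munchJ_eq (full : List Char) (j : Nat) :
    munchJ full j = j + ((full.drop j).takeWhile pvIsP).length := by
  fun_induction munchJ full j with
  | case1 j h hp ih =>
    have hdj : full.drop j = full[j] :: full.drop (j + 1) := List.drop_eq_getElem_cons h
    rw [ih, hdj, List.takeWhile_cons_of_pos hp, List.length_cons]
    omega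
  | case2 j h hp =>
    have hdj : full.drop j = full[j] :: full.drop (j + 1) := List.drop_eq_getElem_cons h
    rw [hdj, List.takeWhile_cons_of_neg (by simpa using hp), List.length_nil]
    omega
  | case3 j h =>
    rw [List.drop_eq_nil_of_le (by omega)]
    simp

theorem munchGoB_spec (full : List Char) (i : Nat) :
    munchGoB full i = pvRuns (full.drop i) i := by
  fun_induction munchGoB full i with
  | case1 i h hp j ih =>
    have hdi : full.drop i = full[i] :: full.drop (i + 1) := List.drop_eq_getElem_cons h
    have hj : j = i + 1 + ((full.drop (i + 1)).takeWhile pvIsP).length := munchJ_eq full (i + 1)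
    have hslice : PySem.List.slice full (some (i : Int)) (some (j : Int)) =
        full[i] :: (full.drop (i + 1)).takeWhile pvIsP := by
      rw [PySem.List.slice_natCast, hdi,
        show j - i = ((full.drop (i + 1)).takeWhile pvIsP).length + 1 by omega,
        List.take_succ_cons, pvTakeTW]
    have hdj : full.drop j = (full.drop (i + 1)).dropWhile pvIsP := by
      rw [hj, ← List.drop_drop, pvDropTW]
    conv_rhs => rw [hdi]
    simp only [pvRuns]
    rw [if_pos hp, ih, hdj, hslice, hj]
  | case2 i h hp ih =>
    have hdi : full.drop i = full[i] :: full.drop (i + 1) := List.drop_eq_getElem_cons h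
    conv_rhs => rw [hdi]
    simp only [pvRuns]
    rw [if_neg hp, ih]
  | case3 i h =>
    rw [List.drop_eq_nil_of_le (by omega)]
    simp [pvRuns]

-- ===== VERDICT (by name: the statement is the Claim_ definition above) =====
theorem maximal_munch_spec : Claim_equal_maximal_munch := by
  intro s _
  unfold Spec_maximal_munch maximal_munch maximal_munch_alt
  rw [(munchGoA_spec s.toList s.toList).1 0 [] (by simp), munchGoB_spec]
  simp
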